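-- pv_equiv track=rewrite | github.com/pedro-fs-garcia/resolucoes_ADS1 | MatDisc/teste.py | matriz_letras
-- ===== SOURCE A (Python) =====
-- import string
--
-- def matriz_letras(n_letras):
--     if n_letras <= 0:
--         return []
--
--     characters = string.ascii_lowercase
--     matriz = []
--
--     for i in range(n_letras * 2 - 1):
--         row = [characters[max(abs(n_letras - i - 1), abs(n_letras - (n_letras * 2 - i - 1)))] for _ in range(n_letras * 2 - 1)]
--         matriz.append(row)
--
--     return matriz
-- ===== SOURCE B (Python) =====
-- import string
--
-- def matriz_letras(n_letras):
--     if n_letras <= 0: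
--         return []
--     characters = string.ascii_lowercase
--     width = 2 * n_letras - 1
--     top = [[characters[d]] * width for d in range(n_letras - 1, -1, -1)]
--     return top + top[::-1][1:]
-- ===== Notes on version B (the rewrite author's own statement) =====
-- stated objective: simpler
-- what changed: B exploits that every row is one constant letter determined by its distance from the center: it builds only the top half of the diamond (one replicated row per distance) and mirrors it, instead of recomputing a max-of-absolute-values letter index for each of the (2n-1)^2 cells.
-- outside the precondition, e.g. on matriz_letras(27): A raises IndexError, B raises IndexError
import Mathlib
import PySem

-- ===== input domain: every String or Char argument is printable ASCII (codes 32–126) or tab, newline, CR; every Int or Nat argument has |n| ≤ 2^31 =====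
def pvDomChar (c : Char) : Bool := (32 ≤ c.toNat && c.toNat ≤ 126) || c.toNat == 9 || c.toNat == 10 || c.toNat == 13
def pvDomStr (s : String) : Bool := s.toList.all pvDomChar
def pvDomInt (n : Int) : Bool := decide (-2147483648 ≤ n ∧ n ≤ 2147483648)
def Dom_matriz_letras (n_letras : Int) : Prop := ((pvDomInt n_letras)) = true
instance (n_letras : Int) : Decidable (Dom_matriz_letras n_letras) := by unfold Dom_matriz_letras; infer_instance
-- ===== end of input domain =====

-- B builds only the top half of the diamond (one constant row per distance) and mirrors it,
-- instead of recomputing the letter index cell by cell over the full (2n-1)² grid (objective: simpler).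

-- string.ascii_lowercase
def pvChars : String := "abcdefghijklmnopqrstuvwxyz"

-- characters[i] : a one-character Python str; total form used under Pre_ (index in range)
def pvCharAt (i : Int) : String :=
  match PySem.Str.pyGet? pvChars i with
  | some c => String.ofList [c]
  | none => ""

-- ===== PORT A =====
def matriz_letras (n_letras : Int) : List (List String) :=
  if n_letras ≤ 0 then []
  else
    (PySem.List.pyRange 0 (n_letras * 2 - 1) 1).foldl
      (fun matriz i =>
        matriz ++ [(PySem.List.pyRange 0 (n_letras * 2 - 1) 1).map
          (fun _ => pvCharAt (max |n_letras - i - 1| |n_letras - (n_letras * 2 - i - 1)|))])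
      []

-- ===== PORT B =====
def matriz_letras_alt (n_letras : Int) : List (List String) :=
  if n_letras ≤ 0 then []
  else
    let width := 2 * n_letras - 1
    let top := (PySem.List.pyRange (n_letras - 1) (-1) (-1)).map
      (fun d => List.replicate width.toNat (pvCharAt d))
    top ++ PySem.List.slice ((PySem.List.slice? top none none (-1)).getD []) (some 1) none

-- ===== PRECONDITION & SPEC =====
-- Pre_ excludes n_letras ≥ 27, where the Python A raises IndexError indexing the 26-letter alphabet (B raises there too).
def Pre_matriz_letras (n_letras : Int) : Prop := n_letras ≤ 26
instance (n_letras : Int) : Decidable (Pre_matriz_letras n_letras) := by unfold Pre_matriz_letras; infer_instance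
def pvWitness_matriz_letras : Int := 4

def Spec_matriz_letras (n_letras : Int) (out : List (List String)) : Prop := out = matriz_letras_alt n_letras
instance (n_letras : Int) (out : List (List String)) : Decidable (Spec_matriz_letras n_letras out) := by unfold Spec_matriz_letras; infer_instance

-- ===== CLAIM (what is proved, stated in full; the proofs are below) =====
def Claim_equal_matriz_letras : Prop := ∀ (n_letras : Int), Dom_matriz_letras n_letras → Pre_matriz_letras n_letras → Spec_matriz_letras n_letras (matriz_letras n_letras)

-- ===== LEMMAS AND PROOFS =====

-- closed form of port A for positive n
theorem pv_A_closed (n : Int) (hn : 0 < n) :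
    matriz_letras n =
      (List.range (2 * n - 1).toNat).map
        (fun (k : Nat) => List.replicate (2 * n - 1).toNat (pvCharAt |n - 1 - (k : Int)|)) := by
  unfold matriz_letras
  rw [if_neg (by omega)]
  rw [PySem.List.foldl_append_singleton_eq_map, List.nil_append]
  have hr : n * 2 - 1 = 2 * n - 1 := by ring
  rw [hr, PySem.List.pyRange_one, List.map_map]
  have h0 : (2 * n - 1 - 0 : Int) = 2 * n - 1 := by ring
  rw [h0]
  apply List.map_congr_left
  intro k hk
  simp only [Function.comp_apply]
  rw [List.map_const']
  simp only [List.length_map, List.length_range]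
  have e1 : n - (n * 2 - (0 + (k : Int)) - 1) = -(n - (0 + (k : Int)) - 1) := by ring
  rw [e1, abs_neg, max_self]
  have e2 : n - (0 + (k : Int)) - 1 = n - 1 - (k : Int) := by ring
  rw [e2]

-- closed form of port B for positive n
theorem pv_B_closed (n : Int) (hn : 0 < n) :
    matriz_letras_alt n =
      ((List.range n.toNat).map
        (fun (k : Nat) => List.replicate (2 * n - 1).toNat (pvCharAt (n - 1 - (k : Int)))))
      ++ ((List.range n.toNat).map
        (fun (k : Nat) => List.replicate (2 * n - 1).toNat (pvCharAt (n - 1 - (k : Int))))).reverse.tail := by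
  unfold matriz_letras_alt
  rw [if_neg (by omega)]
  simp only [PySem.List.slice?_none_none_neg_one, Option.getD_some, PySem.List.slice_from_one,
    PySem.List.pyRange_neg_one, List.map_map]
  have h1 : (n - 1 - (-1) : Int) = n := by ring
  rw [h1]
  rfl

theorem pv_pos_eq (n : Int) (hn : 0 < n) : matriz_letras n = matriz_letras_alt n := by
  rw [pv_A_closed n hn, pv_B_closed n hn]
  apply List.ext_getElem
  · simp
    omega
  · intro i h1 h2
    simp only [List.length_map, List.length_range] at h1
    rw [List.getElem_append]
    split
    · rename_i hi
      simp only [List.getElem_map, List.getElem_range, List.length_map, List.length_range] at hi ⊢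
      congr 2
      rw [abs_of_nonneg (by omega)]
    · rename_i hi
      rw [List.getElem_tail, List.getElem_reverse]
      simp only [List.getElem_map, List.getElem_range, List.length_map, List.length_range,
        ] at hi h2 ⊢
      congr 2
      rw [abs_of_nonpos (by omega)]
      omega

-- ===== VERDICT (by name: the statement is the Claim_ definition above) =====
theorem matriz_letras_spec : Claim_equal_matriz_letras := by
  intro n _ _
  unfold Spec_matriz_letras
  by_cases h : n ≤ 0
  · simp [matriz_letras, matriz_letras_alt, h]
  · exact pv_pos_eq n (by omega)
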